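-- pv_equiv track=rewrite | github.com/gaxmann/suhr | langs.py | replace_quotes
-- ===== SOURCE A (Python) =====
-- def replace_quotes(text, lang='de'):
--     quotes = {
--         'de': ('„', '”'),  # Deutsch
--         'en': ('‘', '’'),  # Englisch
--         'es': ('«', '»')   # Spanisch
--     }
--
--     if lang not in quotes or '"' not in text:
--         return text  # Keine Anführungszeichen, Text unverändert zurückgeben
--
--     # Ergebnis-String aufbauen
--     open_quote, close_quote = quotes[lang]
--     rt = []
--     quote_state = 0  # 0: Erwartet eröffnendes Zeichen, 1: Erwartet schließendes Zeichen
--     for char in text: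
--         if char == '"':
--             if quote_state == 0:
--                 rt.append(open_quote)
--                 quote_state = 1
--             else:
--                 rt.append(close_quote)
--                 quote_state = 0
--         else:
--             rt.append(char)
--     return ''.join(rt)
-- ===== SOURCE B (Python) =====
-- def replace_quotes(text, lang='de'):
--     quotes = {
--         'de': ('„', '”'),  # Deutsch
--         'en': ('‘', '’'),  # Englisch
--         'es': ('«', '»')   # Spanisch
--     }
--
--     if lang not in quotes or '"' not in text:
--         return text
--
--     q = quotes[lang]
--     first, *rest = text.split('"')
--     out = [first]
--     for i, seg in enumerate(rest):
--         out.append(q[i % 2])  # even delimiter index: open quote, odd: close quote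
--         out.append(seg)
--     return ''.join(out)
-- ===== Notes on version B (the rewrite author's own statement) =====
-- stated objective: alternative
-- what changed: Replaces the per-character state machine (quote_state flag toggled while appending each char) by split('"') plus an enumerate walk that inserts quotes[lang][i % 2] between consecutive segments, so the alternation comes from the delimiter index instead of mutable state.
import Mathlib
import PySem

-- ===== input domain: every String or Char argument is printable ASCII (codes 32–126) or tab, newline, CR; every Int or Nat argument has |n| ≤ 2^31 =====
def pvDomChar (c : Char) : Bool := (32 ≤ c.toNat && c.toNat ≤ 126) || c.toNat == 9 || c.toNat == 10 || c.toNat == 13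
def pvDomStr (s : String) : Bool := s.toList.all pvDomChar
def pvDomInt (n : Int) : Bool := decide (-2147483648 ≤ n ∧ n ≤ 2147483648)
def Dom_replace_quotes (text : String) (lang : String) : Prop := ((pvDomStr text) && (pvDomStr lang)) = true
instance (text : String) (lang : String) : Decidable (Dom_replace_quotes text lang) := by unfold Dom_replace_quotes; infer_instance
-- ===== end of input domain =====

-- B replaces A's per-character quote_state machine by split('"') plus an enumerate walk
-- inserting quotes[lang][i % 2] between segments (alternative decomposition, same cost).
-- Each quote mark is a single character, so the dict values are ported as Char pairs (exact).

-- ===== PORT A =====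
def replace_quotes (text : String) (lang : String) : String :=
  let quotes : PySem.Dict String (Char × Char) :=
    PySem.Dict.mk [("de", ('„', '”')), ("en", ('‘', '’')), ("es", ('«', '»'))]
  if !quotes.contains lang || !PySem.Str.isIn "\"" text then text
  else
    -- quotes[lang]: the guard guarantees the key is present, so getD never uses the default
    let q := (quotes.get? lang).getD ('„', '”')
    let r := text.toList.foldl
      (fun (st : List Char × Nat) c =>
        if c = '"' then
          if st.2 = 0 then (st.1 ++ [q.1], 1) else (st.1 ++ [q.2], 0)
        else (st.1 ++ [c], st.2))
      ([], 0)
    String.mk r.1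

-- ===== PORT B =====
-- hand-written port of text.split('"') (single-char separator; Python keeps empty pieces,
-- result is never the empty list)
def splitQ : List Char → List (List Char)
  | [] => [[]]
  | c :: t =>
    if c = '"' then [] :: splitQ t
    else match splitQ t with
      | [] => [[c]]          -- unreachable: splitQ never returns []
      | s :: rest => (c :: s) :: rest

def replace_quotes_alt (text : String) (lang : String) : String :=
  let quotes : PySem.Dict String (Char × Char) :=
    PySem.Dict.mk [("de", ('„', '”')), ("en", ('‘', '’')), ("es", ('«', '»'))]
  if !quotes.contains lang || !PySem.Str.isIn "\"" text then text
  else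
    let q := (quotes.get? lang).getD ('„', '”')
    let segs := splitQ text.toList
    -- 'first, *rest = segs': split never yields [], so headD's default is never used
    let first := segs.headD []
    let rest := segs.drop 1
    let out := (PySem.List.enumerate rest 0).foldl
      (fun acc (p : Int × List Char) =>
        acc ++ [if p.1 % 2 == 0 then q.1 else q.2] ++ p.2)
      first
    String.mk out

-- ===== PRECONDITION & SPEC =====
def Spec_replace_quotes (text : String) (lang : String) (out : String) : Prop := out = replace_quotes_alt text lang
instance (text : String) (lang : String) (out : String) : Decidable (Spec_replace_quotes text lang out) := by unfold Spec_replace_quotes; infer_instance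

-- ===== CLAIM (what is proved, stated in full; the proofs are below) =====
def Claim_equal_replace_quotes : Prop := ∀ (text : String) (lang : String), Dom_replace_quotes text lang → Spec_replace_quotes text lang (replace_quotes text lang)

-- ===== LEMMAS AND PROOFS =====

-- what A's state machine computes from state s
def conv (oq cq : Char) : Nat → List Char → List Char
  | _, [] => []
  | s, c :: t =>
    if c = '"' then
      (if s = 0 then oq :: conv oq cq 1 t else cq :: conv oq cq 0 t)
    else c :: conv oq cq s t

theorem foldA_eq (oq cq : Char) (t : List Char) : ∀ (acc : List Char) (s : Nat),
    (t.foldl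
      (fun (st : List Char × Nat) c =>
        if c = '"' then
          if st.2 = 0 then (st.1 ++ [oq], 1) else (st.1 ++ [cq], 0)
        else (st.1 ++ [c], st.2))
      (acc, s)).1 = acc ++ conv oq cq s t := by
  induction t with
  | nil => intro acc s; simp [conv]
  | cons c t ih =>
    intro acc s
    by_cases hc : c = '"'
    · by_cases hs : s = 0
      · simp [List.foldl_cons, hc, hs, conv, ih]
      · simp [List.foldl_cons, hc, hs, conv, ih]
    · simp [List.foldl_cons, hc, conv, ih]

-- what B's enumerate walk computes starting at index n
def weave (oq cq : Char) : Int → List (List Char) → List Char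
  | _, [] => []
  | n, s :: rest => (if n % 2 == 0 then oq else cq) :: (s ++ weave oq cq (n + 1) rest)

theorem foldB_eq (oq cq : Char) (segs : List (List Char)) : ∀ (acc : List Char) (n : Int),
    (PySem.List.enumerate segs n).foldl
      (fun acc (p : Int × List Char) =>
        acc ++ [if p.1 % 2 == 0 then oq else cq] ++ p.2)
      acc = acc ++ weave oq cq n segs := by
  induction segs with
  | nil => intro acc n; simp [PySem.List.enumerate_nil, weave]
  | cons s rest ih =>
    intro acc n
    rw [PySem.List.enumerate_cons, List.foldl_cons, ih]
    simp [weave]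

theorem splitQ_ne_nil (t : List Char) : splitQ t ≠ [] := by
  cases t with
  | nil => simp [splitQ]
  | cons c t =>
    simp only [splitQ]
    split
    · simp
    · cases h : splitQ t <;> simp

theorem splitQ_quote (t : List Char) : splitQ ('"' :: t) = [] :: splitQ t := by
  simp [splitQ]

theorem splitQ_other (c : Char) (t : List Char) (h : c ≠ '"') :
    splitQ (c :: t) = (c :: (splitQ t).headD []) :: (splitQ t).drop 1 := by
  cases h' : splitQ t with
  | nil => exact absurd h' (splitQ_ne_nil t)
  | cons a b => simp [splitQ, if_neg h, h']

theorem conv_quote (oq cq : Char) (s : Nat) (t : List Char) :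
    conv oq cq s ('"' :: t) = if s = 0 then oq :: conv oq cq 1 t else cq :: conv oq cq 0 t := by
  simp [conv]

theorem conv_other (oq cq : Char) (s : Nat) (c : Char) (t : List Char) (h : c ≠ '"') :
    conv oq cq s (c :: t) = c :: conv oq cq s t := by
  simp [conv, h]

theorem bridge (oq cq : Char) (t : List Char) : ∀ (n : Int),
    (splitQ t).headD [] ++ weave oq cq n ((splitQ t).drop 1)
      = conv oq cq (if n % 2 = 0 then 0 else 1) t := by
  induction t with
  | nil => intro n; simp [splitQ, weave, conv]
  | cons c t ih =>
    intro n
    by_cases hc : c = '"'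
    · subst hc
      obtain ⟨s0, rest, hsp⟩ : ∃ s0 rest, splitQ t = s0 :: rest := by
        cases h : splitQ t with
        | nil => exact absurd h (splitQ_ne_nil t)
        | cons a b => exact ⟨a, b, rfl⟩
      have ih' := ih (n + 1)
      rw [hsp] at ih'
      simp only [List.headD_cons, List.drop_one, List.tail_cons] at ih'
      rw [splitQ_quote, conv_quote]
      simp only [List.headD_cons, List.drop_one, List.tail_cons, List.nil_append, hsp, weave]
      by_cases h0 : n % 2 = 0
      · have h1 : (n + 1) % 2 ≠ 0 := by omega
        simp only [h1] at ih'
        simp [h0, ih']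
      · have h1 : (n + 1) % 2 = 0 := by omega
        simp only [h1] at ih'
        simp [h0, ih']
    · rw [splitQ_other c t hc, conv_other oq cq _ c t hc]
      simp only [List.headD_cons, List.cons_append, List.drop_succ_cons, List.drop_zero]
      rw [ih n]

-- ===== VERDICT (by name: the statement is the Claim_ definition above) =====
theorem replace_quotes_spec : Claim_equal_replace_quotes := by
  intro text lang _
  unfold Spec_replace_quotes replace_quotes replace_quotes_alt
  simp only []
  split
  · rfl
  · rw [foldA_eq, foldB_eq, List.nil_append, bridge]
    norm_num
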